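-- pv_equiv track=rewrite | github.com/hmshujaatzaheer/spartan-framework | src/spartan/raas/prm_defense.py | _segment_step
-- ===== SOURCE A (Python) =====
-- def _segment_step(step: str) -> tuple:
--     """Segment step into NL and math components.
--
--     Args:
--         step: Step text
--
--     Returns:
--         Tuple of (nl_parts, math_parts)
--     """
--     nl_parts = []
--     math_parts = []
--
--     # Simple heuristic: split by mathematical expressions
--     # In practice, use more sophisticated parsing
--     current_part = ""
--     in_math = False
--
--     math_chars = set("0123456789+-*/=^()[]{}∫∑∏√<>≤≥≠≈")
--
--     for char in step:
--         if char in math_chars: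
--             if not in_math and current_part:
--                 nl_parts.append(current_part)
--                 current_part = ""
--             in_math = True
--             current_part += char
--         else:
--             if in_math and current_part:
--                 math_parts.append(current_part)
--                 current_part = ""
--             in_math = False
--             current_part += char
--
--     # Handle remaining part
--     if current_part:
--         if in_math:
--             math_parts.append(current_part)
--         else:
--             nl_parts.append(current_part)
--
--     return nl_parts, math_parts
-- ===== SOURCE B (Python) =====
-- def _segment_step(step: str) -> tuple:
--     """Segment step into NL and math components (two-pointer run scanner)."""
--     math_chars = set("0123456789+-*/=^()[]{}∫∑∏√<>≤≥≠≈")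
--     nl_parts = []
--     math_parts = []
--     i, n = 0, len(step)
--     while i < n:
--         is_math = step[i] in math_chars
--         j = i + 1
--         while j < n and (step[j] in math_chars) == is_math:
--             j += 1
--         (math_parts if is_math else nl_parts).append(step[i:j])
--         i = j
--     return nl_parts, math_parts
-- ===== Notes on version B (the rewrite author's own statement) =====
-- stated objective: alternative
-- what changed: Replaces A's character-by-character in_math/current_part state machine with a two-pointer run scanner that finds each maximal same-class run with an inner scan and slices it out, dispatching whole runs to nl_parts or math_parts.
import Mathlib
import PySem

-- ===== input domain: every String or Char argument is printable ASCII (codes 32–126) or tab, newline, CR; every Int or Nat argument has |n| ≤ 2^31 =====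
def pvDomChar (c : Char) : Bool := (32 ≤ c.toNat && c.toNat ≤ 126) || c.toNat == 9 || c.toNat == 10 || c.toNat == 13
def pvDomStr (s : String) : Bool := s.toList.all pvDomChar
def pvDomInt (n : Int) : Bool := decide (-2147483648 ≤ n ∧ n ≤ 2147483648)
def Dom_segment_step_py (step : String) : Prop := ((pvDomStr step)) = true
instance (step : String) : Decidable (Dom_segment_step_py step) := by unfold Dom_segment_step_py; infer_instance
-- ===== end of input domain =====

-- B replaces A's per-character state machine with a two-pointer maximal-run scanner; same return value, similar cost.

-- shared: the math character class both Pythons build as `set("0123456789+-*/=^()[]{}∫∑∏√<>≤≥≠≈")`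
def mathChars : List Char := "0123456789+-*/=^()[]{}∫∑∏√<>≤≥≠≈".toList
def isMath (c : Char) : Bool := mathChars.contains c

-- ===== PORT A =====
-- A's for-loop over characters with state (nl_parts, math_parts, current_part, in_math), then the trailing flush.
def loopA : List Char → List String → List String → List Char → Bool → List String × List String
  | [], nl, mp, cur, im =>
      if cur ≠ [] then
        if im then (nl, mp ++ [String.ofList cur]) else (nl ++ [String.ofList cur], mp)
      else (nl, mp)
  | c :: rest, nl, mp, cur, im =>
      if isMath c then
        if !im && cur ≠ [] then loopA rest (nl ++ [String.ofList cur]) mp [c] true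
        else loopA rest nl mp (cur ++ [c]) true
      else
        if im && cur ≠ [] then loopA rest nl (mp ++ [String.ofList cur]) [c] false
        else loopA rest nl mp (cur ++ [c]) false

def segment_step_py (step : String) : List String × List String :=
  loopA step.toList [] [] [] false

-- ===== PORT B =====
-- Source B's outer while loop: each iteration takes one maximal run of chars of the same class (inner while = takeWhile/dropWhile).
def runsB : List Char → List (Bool × List Char)
  | [] => []
  | c :: rest =>
      (isMath c, c :: rest.takeWhile (fun d => isMath d == isMath c)) ::
      runsB (rest.dropWhile (fun d => isMath d == isMath c))
  termination_by cs => cs.length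
  decreasing_by
    simp only [List.length_cons]
    exact Nat.lt_succ_of_le (List.length_dropWhile_le _ _)

def segment_step_py_alt (step : String) : List String × List String :=
  (runsB step.toList).foldl
    (fun acc g => if g.1 then (acc.1, acc.2 ++ [String.ofList g.2]) else (acc.1 ++ [String.ofList g.2], acc.2))
    ([], [])

-- ===== PRECONDITION & SPEC =====
def Spec_segment_step_py (step : String) (out : List String × List String) : Prop := out = segment_step_py_alt step
instance (step : String) (out : List String × List String) : Decidable (Spec_segment_step_py step out) := by unfold Spec_segment_step_py; infer_instance

-- ===== CLAIM (what is proved, stated in full; the proofs are below) =====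
def Claim_equal_segment_step_py : Prop := ∀ (step : String), Dom_segment_step_py step → Spec_segment_step_py step (segment_step_py step)

-- ===== LEMMAS AND PROOFS =====

def goB (gs : List (Bool × List Char)) (acc : List String × List String) : List String × List String :=
  gs.foldl (fun acc g => if g.1 then (acc.1, acc.2 ++ [String.ofList g.2]) else (acc.1 ++ [String.ofList g.2], acc.2)) acc

-- the pending run of A's state machine, prepended to B's runs of the rest
def pendRuns (im : Bool) (cur cs : List Char) : List (Bool × List Char) :=
  if cur = [] then runsB cs
  else (im, cur ++ cs.takeWhile (fun d => isMath d == im)) :: runsB (cs.dropWhile (fun d => isMath d == im))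

theorem loopA_pendRuns : ∀ (cs : List Char) (nl mp : List String) (cur : List Char) (im : Bool),
    (∀ c ∈ cur, isMath c = im) →
    loopA cs nl mp cur im = goB (pendRuns im cur cs) (nl, mp) := by
  intro cs
  induction cs with
  | nil =>
      intro nl mp cur im hinv
      by_cases hc : cur = []
      · simp [loopA, pendRuns, hc, runsB, goB]
      · cases im <;> simp [loopA, pendRuns, hc, runsB, goB]
  | cons c rest ih =>
      intro nl mp cur im hinv
      by_cases hm : isMath c
      · by_cases hflush : im = false ∧ cur ≠ []
        · obtain ⟨him, hc⟩ := hflush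
          subst him
          rw [show loopA (c :: rest) nl mp cur false
                = loopA rest (nl ++ [String.ofList cur]) mp [c] true by
              simp [loopA, hm, hc]]
          rw [ih _ _ _ _ (by simp [hm])]
          have hrhs : pendRuns false cur (c :: rest)
              = (false, cur) :: pendRuns true [c] rest := by
            simp [pendRuns, hc, runsB, hm]
          rw [hrhs]
          simp [goB]
        · -- extend (or start, with empty cur) the math run
          have hstep : loopA (c :: rest) nl mp cur im
              = loopA rest nl mp (cur ++ [c]) true := by
            rcases Decidable.em (cur = []) with hc | hc
            · simp [loopA, hm, hc]
            · have him : im = true := by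
                rcases im with _ | _
                · exact absurd ⟨rfl, hc⟩ hflush
                · rfl
              simp [loopA, hm, hc, him]
          rw [hstep, ih _ _ _ _ ?_]
          · rcases Decidable.em (cur = []) with hc | hc
            · subst hc
              simp [pendRuns, runsB, hm]
            · have him : im = true := by
                rcases im with _ | _
                · exact absurd ⟨rfl, hc⟩ hflush
                · rfl
              subst him
              simp [pendRuns, hc, hm]
          · intro x hx
            rcases List.mem_append.mp hx with h | h
            · have him : im = true := by
                rcases im with _ | _
                · exact absurd ⟨rfl, by rintro rfl; simp at h⟩ hflush
                · rfl
              exact (hinv x h).trans him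
            · simp at h; subst h; exact hm
      · -- non-math character, symmetric
        by_cases hflush : im = true ∧ cur ≠ []
        · obtain ⟨him, hc⟩ := hflush
          subst him
          rw [show loopA (c :: rest) nl mp cur true
                = loopA rest nl (mp ++ [String.ofList cur]) [c] false by
              simp [loopA, hm, hc]]
          rw [ih _ _ _ _ (by simp [hm])]
          have hrhs : pendRuns true cur (c :: rest)
              = (true, cur) :: pendRuns false [c] rest := by
            simp [pendRuns, hc, runsB, hm]
          rw [hrhs]
          simp [goB]
        · have hstep : loopA (c :: rest) nl mp cur im
              = loopA rest nl mp (cur ++ [c]) false := by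
            rcases Decidable.em (cur = []) with hc | hc
            · simp [loopA, hm, hc]
            · have him : im = false := by
                rcases im with _ | _
                · rfl
                · exact absurd ⟨rfl, hc⟩ hflush
              simp [loopA, hm, hc, him]
          rw [hstep, ih _ _ _ _ ?_]
          · rcases Decidable.em (cur = []) with hc | hc
            · subst hc
              simp [pendRuns, runsB, hm]
            · have him : im = false := by
                rcases im with _ | _
                · rfl
                · exact absurd ⟨rfl, hc⟩ hflush
              subst him
              simp [pendRuns, hc, hm]
          · intro x hx
            rcases List.mem_append.mp hx with h | h
            · have him : im = false := by
                rcases im with _ | _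
                · rfl
                · exact absurd ⟨rfl, by rintro rfl; simp at h⟩ hflush
              exact (hinv x h).trans him
            · simp at h; subst h; simpa using hm

theorem segment_step_py_spec : Claim_equal_segment_step_py := by
  intro step _
  unfold Spec_segment_step_py segment_step_py segment_step_py_alt
  rw [loopA_pendRuns _ _ _ _ _ (by simp)]
  simp [pendRuns, goB]
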